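-- pv_equiv track=rewrite | github.com/menpett/DataScience | basico/vsc_mf/Ejercicio_20.py | mas_larga
-- ===== SOURCE A (Python) =====
-- def mas_larga(lista_p):
--     # tome una lista de palabras
--     # devolver la más larga
--
--     lista_len = []
--
--     for i in lista_p:
--         num = len(i)
--         lista_len.append(num)
--
--     mayor = max(lista_len)
--     ind = lista_len.index(max(lista_len))
--
--     return mayor,ind
-- ===== SOURCE B (Python) =====
-- def mas_larga(lista_p):
--     # single pass: track the best length and its (first) index
--     if not lista_p:
--         raise ValueError("max() arg is an empty sequence")
--     best_len = -1
--     best_idx = -1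
--     for idx, palabra in enumerate(lista_p):
--         n = len(palabra)
--         if n > best_len:
--             best_len = n
--             best_idx = idx
--     return best_len, best_idx
-- ===== Notes on version B (the rewrite author's own statement) =====
-- stated objective: simpler
-- what changed: B computes the answer in one pass with enumerate keeping a running (best_len, best_idx), instead of building a list of lengths and scanning it again with max and index; strict '>' keeps the first of any ties, matching .index.
-- outside the precondition, e.g. on mas_larga([]): A raises ValueError, B raises ValueError
import Mathlib
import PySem

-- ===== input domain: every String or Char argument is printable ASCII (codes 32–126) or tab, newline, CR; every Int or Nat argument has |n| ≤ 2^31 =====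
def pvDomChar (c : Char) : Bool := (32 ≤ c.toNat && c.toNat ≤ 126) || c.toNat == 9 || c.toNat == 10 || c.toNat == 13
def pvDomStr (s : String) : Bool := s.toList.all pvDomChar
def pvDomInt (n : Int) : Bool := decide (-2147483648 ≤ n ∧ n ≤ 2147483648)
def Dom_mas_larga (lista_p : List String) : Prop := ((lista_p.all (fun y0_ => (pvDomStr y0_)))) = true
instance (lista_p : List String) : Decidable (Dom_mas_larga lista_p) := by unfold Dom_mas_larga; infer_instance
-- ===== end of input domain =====

-- B replaces A's three passes (build length list, max, index) by one enumerate pass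
-- keeping a running (best_len, best_idx); simpler, same result including ties.


-- ===== PORT A =====
-- lista_len built by appending len(i) for each word; then max and index of max.
-- (Python calls max(lista_len) twice; both calls return 'mayor', ported once.)
def mas_larga (lista_p : List String) : Int × Int :=
  let lista_len : List Int := lista_p.foldl (fun acc i => acc ++ [PySem.Str.len i]) []
  match PySem.List.max? lista_len (fun y => y) with
  | none => (0, 0)   -- max([]) raises ValueError: excluded by Pre_mas_larga
  | some mayor =>
      let ind : Int := ((PySem.List.index? lista_len mayor).getD 0 : Nat)
      (mayor, ind)

-- ===== PORT B =====
-- single pass over enumerate, updating on strictly greater length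
def mas_larga_alt (lista_p : List String) : Int × Int :=
  match lista_p with
  | [] => (0, 0)     -- B raises ValueError here: excluded by Pre_mas_larga
  | _ :: _ =>
      (PySem.List.enumerate lista_p 0).foldl
        (fun best p => if best.1 < PySem.Str.len p.2 then (PySem.Str.len p.2, p.1) else best)
        (-1, -1)

-- ===== PRECONDITION & SPEC =====
-- Pre_ excludes only the empty list, on which A's max([]) raises ValueError (B raises too).
def Pre_mas_larga (lista_p : List String) : Prop := lista_p ≠ []
instance (lista_p : List String) : Decidable (Pre_mas_larga lista_p) := by unfold Pre_mas_larga; infer_instance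
def pvWitness_mas_larga : List String := ["hola", "mundo!"]
def Spec_mas_larga (lista_p : List String) (out : Int × Int) : Prop := out = mas_larga_alt lista_p
instance (lista_p : List String) (out : Int × Int) : Decidable (Spec_mas_larga lista_p out) := by unfold Spec_mas_larga; infer_instance

-- ===== CLAIM (what is proved, stated in full; the proofs are below) =====
def Claim_equal_mas_larga : Prop := ∀ (lista_p : List String), Dom_mas_larga lista_p → Pre_mas_larga lista_p → Spec_mas_larga lista_p (mas_larga lista_p)

-- ===== LEMMAS AND PROOFS =====

-- A's accumulation loop builds exactly the list of lengths.
theorem foldl_append_len (lista_p : List String) (acc : List Int) :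
    lista_p.foldl (fun acc i => acc ++ [PySem.Str.len i]) acc
      = acc ++ lista_p.map PySem.Str.len := by
  induction lista_p generalizing acc with
  | nil => simp
  | cons x t ih => rw [List.foldl_cons, ih, List.map_cons]; simp

theorem str_len_nonneg (s : String) : 0 ≤ PySem.Str.len s := by
  simp [PySem.Str.len]

-- characterization of B's fold over an enumerated suffix
theorem foldB (xs : List String) (s : Int) (bl bi : Int) :
    (PySem.List.enumerate xs s).foldl
        (fun best p => if best.1 < PySem.Str.len p.2 then (PySem.Str.len p.2, p.1) else best)
        (bl, bi)
      = (let m := (xs.map PySem.Str.len).foldl max bl;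
         if bl < m then
           (m, s + ((PySem.List.index? (xs.map PySem.Str.len) m).getD 0 : Nat))
         else (bl, bi)) := by
  induction xs generalizing s bl bi with
  | nil => simp
  | cons x t ih =>
      rw [PySem.List.enumerate_cons]
      simp only [List.foldl_cons, List.map_cons, List.foldl_cons]
      by_cases hx : bl < PySem.Str.len x
      · rw [if_pos hx, ih]
        have hmax : max bl (PySem.Str.len x) = PySem.Str.len x := by omega
        rw [hmax]
        set m := (t.map PySem.Str.len).foldl max (PySem.Str.len x) with hm
        have hle : PySem.Str.len x ≤ m := (PySem.List.le_foldl_max _ _).1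
        by_cases h2 : PySem.Str.len x < m
        · rw [if_pos h2, if_pos (by omega)]
          have hmem : m ∈ t.map PySem.Str.len := by
            rcases PySem.List.foldl_max_mem (t.map PySem.Str.len) (PySem.Str.len x) with h | h
            · omega
            · exact h
          have hne : PySem.Str.len x ≠ m := by omega
          rw [PySem.List.index?_cons_of_ne _ hne]
          obtain ⟨k, hk⟩ := Option.isSome_iff_exists.mp
            ((PySem.List.index?_isSome_iff (t.map PySem.Str.len) m).mpr hmem)
          rw [hk]
          simp only [Option.map_some, Option.getD_some]
          push_cast
          ring_nf
        · have hme : m = PySem.Str.len x := by omega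
          rw [if_neg h2, hme, if_pos (hme ▸ hx : bl < PySem.Str.len x), PySem.List.index?_cons_self]
          norm_num
      · rw [if_neg hx, ih]
        have hmax : max bl (PySem.Str.len x) = bl := by omega
        rw [hmax]
        set m := (t.map PySem.Str.len).foldl max bl with hm
        have hle : bl ≤ m := (PySem.List.le_foldl_max _ _).1
        by_cases h2 : bl < m
        · rw [if_pos h2, if_pos h2]
          have hmem : m ∈ t.map PySem.Str.len := by
            rcases PySem.List.foldl_max_mem (t.map PySem.Str.len) bl with h | h
            · omega
            · exact h
          have hne : PySem.Str.len x ≠ m := by omega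
          rw [PySem.List.index?_cons_of_ne _ hne]
          obtain ⟨k, hk⟩ := Option.isSome_iff_exists.mp
            ((PySem.List.index?_isSome_iff (t.map PySem.Str.len) m).mpr hmem)
          rw [hk]
          simp only [Option.map_some, Option.getD_some]
          push_cast
          ring_nf
        · rw [if_neg h2, if_neg h2]

-- ===== VERDICT (by name: the statement is the Claim_ definition above) =====
theorem mas_larga_spec : Claim_equal_mas_larga := by
  intro lista_p _ hpre
  unfold Spec_mas_larga
  match lista_p, hpre with
  | x :: t, _ =>
    unfold mas_larga mas_larga_alt
    rw [foldB]
    simp only [foldl_append_len, List.nil_append, List.map_cons]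
    rw [PySem.List.max?_id_cons]
    have h0 : 0 ≤ PySem.Str.len x := str_len_nonneg x
    have hfold : (PySem.Str.len x :: t.map PySem.Str.len).foldl max (-1)
        = (t.map PySem.Str.len).foldl max (PySem.Str.len x) := by
      simp only [List.foldl_cons]
      congr 1 <;> omega
    have hle : PySem.Str.len x ≤ (t.map PySem.Str.len).foldl max (PySem.Str.len x) :=
      (PySem.List.le_foldl_max _ _).1
    simp only [hfold]
    rw [if_pos (by omega)]
    norm_num
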